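-- pv_equiv track=rewrite | github.com/Shiv2157k/LeetCode2024 | microsoft/dpnrecursion/StoneGame877.py | stoneGameV0
-- ===== SOURCE A (Python) =====
-- from typing import List
--
-- def stoneGameV0(piles: List[int]) -> bool:
--     """
--     Approach: DP
--     T: O(N^2)
--     S: O(N^2)
--     :param piles:
--     :return:
--     """
--
--     n = len(piles)
--     dp = [[0] * (n + 2) for _ in range(n + 2)]
--
--     for size in range(1, n + 1):
--         for i in range(0, n - size + 1):
--
--             j = i + size - 1
--             parity = (j + i + n) % 2
--
--             if parity == 1:
--                 dp[i + 1][j + 1] = max(piles[i] + dp[i + 2][j + 1], piles[j] + dp[i + 1][j])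
--             else:
--                 dp[i + 1][j + 1] = min(-piles[i] + dp[i + 2][j + 1], -piles[j] + dp[i + 1][j])
--     return dp[1][n] > 0
-- ===== SOURCE B (Python) =====
-- from typing import List
--
-- def stoneGameV0(piles: List[int]) -> bool:
--     """Top-down memoized minimax over closed intervals piles[i..j] instead of
--     a bottom-up (n+2)x(n+2) table; same signed value, O(n^2) time, memo dict."""
--     n = len(piles)
--     memo = {}
--
--     def solve(i: int, j: int) -> int:
--         if i > j:
--             return 0
--         key = (i, j)
--         if key in memo:
--             return memo[key]
--         if (i + j + n) % 2 == 1: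
--             v = max(piles[i] + solve(i + 1, j), piles[j] + solve(i, j - 1))
--         else:
--             v = min(-piles[i] + solve(i + 1, j), -piles[j] + solve(i, j - 1))
--         memo[key] = v
--         return v
--
--     return solve(0, n - 1) > 0
-- ===== Notes on version B (the rewrite author's own statement) =====
-- stated objective: alternative
-- what changed: Replaced the bottom-up (n+2)x(n+2) table filled by size with a top-down memoized recursion solve(i,j) over closed intervals, returning solve(0,n-1) > 0.
import Mathlib
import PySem

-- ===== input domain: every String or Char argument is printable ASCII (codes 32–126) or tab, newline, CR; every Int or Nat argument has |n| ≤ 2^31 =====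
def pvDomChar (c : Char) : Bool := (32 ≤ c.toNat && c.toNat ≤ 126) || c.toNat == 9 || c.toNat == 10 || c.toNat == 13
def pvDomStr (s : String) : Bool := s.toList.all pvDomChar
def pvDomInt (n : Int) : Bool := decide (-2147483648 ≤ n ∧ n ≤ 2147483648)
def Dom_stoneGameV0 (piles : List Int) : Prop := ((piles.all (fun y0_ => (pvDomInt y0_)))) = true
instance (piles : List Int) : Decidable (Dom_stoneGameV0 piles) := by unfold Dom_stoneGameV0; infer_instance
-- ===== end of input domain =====

-- B replaces A's bottom-up (n+2)x(n+2) interval-DP table by a top-down memoized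
-- recursion over closed intervals (ported as plain fuel recursion: same values).

-- ===== PORT A =====
-- one assignment dp[i+1][j+1] = v of A's inner loop body; A's 2D list is a
-- List (List Int) (all cells start at 0, as in A)
def dpStepA (piles : List Int) (n size : Nat) (dp : List (List Int)) (i : Nat) : List (List Int) :=
  let j := i + size - 1
  -- piles[i], piles[j] and the dp cells read are in range whenever A reads
  -- them, so getD is exact; Int % 2 on these nonnegative values agrees with Python's %
  let row1 := dp.getD (i + 2) []
  let row0 := dp.getD (i + 1) []
  let v : Int :=
    if (j + i + n) % 2 = 1 then
      max (piles.getD i 0 + row1.getD (j + 1) 0) (piles.getD j 0 + row0.getD j 0)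
    else
      min (-piles.getD i 0 + row1.getD (j + 1) 0) (-piles.getD j 0 + row0.getD j 0)
  dp.set (i + 1) (row0.set (j + 1) v)

def stoneGameV0 (piles : List Int) : Bool :=
  let n := piles.length
  let dp : List (List Int) :=
    (List.range' 1 n).foldl                                  -- for size in range(1, n+1)
      (fun dp size =>
        (List.range (n - size + 1)).foldl                    -- for i in range(0, n-size+1)
          (dpStepA piles n size) dp)
      (List.replicate (n + 2) (List.replicate (n + 2) 0))
  decide ((dp.getD 1 []).getD n 0 > 0)

-- ===== PORT B =====
-- solve(i, j) of Source B; the memo dict only caches values of this pure function,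
-- so the port is the plain recursion (fuel = n is a totality guard: the
-- interval shrinks by one per call, so fuel never runs out on B's calls)
def solveB (piles : List Int) (n : Nat) : Nat → Int → Int → Int
  | fuel, i, j =>
    if i > j then 0
    else
      match fuel with
      | 0 => 0
      | f + 1 =>
        if (i + j + (n : Int)) % 2 = 1 then
          max (piles.getD i.toNat 0 + solveB piles n f (i + 1) j)
              (piles.getD j.toNat 0 + solveB piles n f i (j - 1))
        else
          min (-piles.getD i.toNat 0 + solveB piles n f (i + 1) j)
              (-piles.getD j.toNat 0 + solveB piles n f i (j - 1))

def stoneGameV0_alt (piles : List Int) : Bool :=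
  let n := piles.length
  decide (solveB piles n n 0 ((n : Int) - 1) > 0)

-- ===== PRECONDITION & SPEC =====
def Spec_stoneGameV0 (piles : List Int) (out : Bool) : Prop := out = stoneGameV0_alt piles
instance (piles : List Int) (out : Bool) : Decidable (Spec_stoneGameV0 piles out) := by unfold Spec_stoneGameV0; infer_instance

-- ===== CLAIM (what is proved, stated in full; the proofs are below) =====
def Claim_equal_stoneGameV0 : Prop := ∀ (piles : List Int), Dom_stoneGameV0 piles → Spec_stoneGameV0 piles (stoneGameV0 piles)

-- ===== LEMMAS AND PROOFS =====

-- the result of solveB does not depend on the fuel, as long as it covers the interval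
theorem solveB_fuel (piles : List Int) (n : Nat) :
    ∀ (f g : Nat) (i j : Int), (j + 1 - i).toNat ≤ f → (j + 1 - i).toNat ≤ g →
      solveB piles n f i j = solveB piles n g i j := by
  intro f
  induction f with
  | zero =>
    intro g i j hf _
    have hij : i > j := by omega
    cases g <;> simp [solveB, hij]
  | succ f ih =>
    intro g i j hf hg
    by_cases hij : i > j
    · cases g <;> simp [solveB, hij]
    · have hg1 : ∃ g', g = g' + 1 := by cases g with
        | zero => omega
        | succ g' => exact ⟨g', rfl⟩
      obtain ⟨g', rfl⟩ := hg1
      simp only [solveB, hij, if_false]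
      rw [ih g' (i + 1) j (by omega) (by omega), ih g' i (j - 1) (by omega) (by omega)]

theorem solveB_gt (piles : List Int) (n f : Nat) (i j : Int) (hij : i > j) :
    solveB piles n f i j = 0 := by
  cases f <;> simp [solveB, hij]

-- one unfolding of solveB at full fuel n (the memoised recursion's defining equation)
theorem solveB_eq_at (piles : List Int) (n : Nat) (i j : Int)
    (hij : i ≤ j) (hn : (j + 1 - i).toNat ≤ n) :
    solveB piles n n i j =
      if (i + j + (n : Int)) % 2 = 1 then
        max (piles.getD i.toNat 0 + solveB piles n n (i + 1) j)
            (piles.getD j.toNat 0 + solveB piles n n i (j - 1))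
      else
        min (-piles.getD i.toNat 0 + solveB piles n n (i + 1) j)
            (-piles.getD j.toNat 0 + solveB piles n n i (j - 1)) := by
  obtain ⟨f, rfl⟩ : ∃ f, n = f + 1 := ⟨n - 1, by omega⟩
  conv_lhs => rw [solveB.eq_def]
  simp only [if_neg (show ¬ i > j by omega)]
  rw [solveB_fuel piles (f + 1) f (f + 1) (i + 1) j (by omega) (by omega),
      solveB_fuel piles (f + 1) f (f + 1) i (j - 1) (by omega) (by omega)]

-- getD after a set, in closed form
theorem pv_getD_set {α : Type} (xs : List α) (i k : Nat) (v d : α) :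
    (xs.set i v).getD k d = if i = k ∧ i < xs.length then v else xs.getD k d := by
  rw [List.getD_eq_getElem?_getD, List.getD_eq_getElem?_getD, List.getElem?_set]
  by_cases h : i = k
  · subst h
    by_cases h2 : i < xs.length <;> simp [h2]
  · simp [h]

-- invariant of A's table: after the pass for `size = s` has handled start
-- indices i < k (and all passes for smaller sizes are complete), cell
-- (a, b) = (i+1, j+1) holds the minimax value of interval [a-1, b-1]
def Filled (piles : List Int) (n s k : Nat) (dp : List (List Int)) : Prop :=
  dp.length = n + 2 ∧
  (∀ a : Nat, a < n + 2 → (dp.getD a []).length = n + 2) ∧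
  ∀ a b : Nat,
    (dp.getD a []).getD b 0 =
      if 1 ≤ a ∧ a ≤ b ∧ b ≤ n ∧ (b + 1 - a < s ∨ (b + 1 - a = s ∧ a ≤ k)) then
        solveB piles n n ((a : Int) - 1) ((b : Int) - 1)
      else 0

theorem pv_getD_replicate {α : Type} (m i : Nat) (x d : α) :
    (List.replicate m x).getD i d = if i < m then x else d := by
  rw [List.getD_eq_getElem?_getD, List.getElem?_replicate]
  split <;> rfl

theorem filled_zero (piles : List Int) (n : Nat) :
    Filled piles n 1 0 (List.replicate (n + 2) (List.replicate (n + 2) 0)) := by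
  refine ⟨List.length_replicate, ?_, ?_⟩
  · intro a ha
    rw [pv_getD_replicate, if_pos ha, List.length_replicate]
  · intro a b
    rw [if_neg (by omega), pv_getD_replicate]
    by_cases ha : a < n + 2
    · rw [if_pos ha, pv_getD_replicate]
      split <;> rfl
    · rw [if_neg ha]
      rfl

-- the freshly written cell equals the memoised recursion's value
theorem step_cell (piles : List Int) (n t k : Nat)
    (hsn : t + 1 ≤ n) (hk : k ≤ n - (t + 1)) (dp : List (List Int))
    (h : ∀ a b : Nat,
      (dp.getD a []).getD b 0 =
        if 1 ≤ a ∧ a ≤ b ∧ b ≤ n ∧ (b + 1 - a < t + 1 ∨ (b + 1 - a = t + 1 ∧ a ≤ k)) then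
          solveB piles n n ((a : Int) - 1) ((b : Int) - 1)
        else 0) :
    (if (k + t + k + n) % 2 = 1 then
      max (piles.getD k 0 + (dp.getD (k + 2) []).getD (k + t + 1) 0)
          (piles.getD (k + t) 0 + (dp.getD (k + 1) []).getD (k + t) 0)
    else
      min (-piles.getD k 0 + (dp.getD (k + 2) []).getD (k + t + 1) 0)
          (-piles.getD (k + t) 0 + (dp.getD (k + 1) []).getD (k + t) 0)) =
    solveB piles n n ((k : Int)) ((k : Int) + (t : Int)) := by
  rw [solveB_eq_at piles n (k : Int) ((k : Int) + (t : Int)) (by omega) (by omega)]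
  have hri : (dp.getD (k + 2) []).getD (k + t + 1) 0
      = solveB piles n n ((k : Int) + 1) ((k : Int) + (t : Int)) := by
    rw [h]
    by_cases ht : t = 0
    · subst ht
      rw [if_neg (by omega), solveB_gt piles n n _ _ (by omega)]
    · rw [if_pos (by omega)]
      have c1 : ((k + 2 : Nat) : Int) - 1 = (k : Int) + 1 := by push_cast; ring
      have c2 : ((k + t + 1 : Nat) : Int) - 1 = (k : Int) + (t : Int) := by push_cast; ring
      rw [c1, c2]
  have hrj : (dp.getD (k + 1) []).getD (k + t) 0
      = solveB piles n n ((k : Int)) ((k : Int) + (t : Int) - 1) := by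
    rw [h]
    by_cases ht : t = 0
    · subst ht
      rw [if_neg (by omega), solveB_gt piles n n _ _ (by omega)]
    · rw [if_pos (by omega)]
      have c3 : ((k + 1 : Nat) : Int) - 1 = (k : Int) := by push_cast; ring
      have c4 : ((k + t : Nat) : Int) - 1 = (k : Int) + (t : Int) - 1 := by push_cast; ring
      rw [c3, c4]
  have hgi : piles.getD ((k : Int)).toNat 0 = piles.getD k 0 := by
    congr 1
  have hgj : piles.getD ((k : Int) + (t : Int)).toNat 0 = piles.getD (k + t) 0 := by
    congr 1
  rw [hri, hrj, hgi, hgj]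
  by_cases hp : (k + t + k + n) % 2 = 1
  · rw [if_pos hp, if_pos (by omega)]
  · rw [if_neg hp, if_neg (by omega)]

theorem step_filled (piles : List Int) (n s k : Nat) (dp : List (List Int))
    (hs1 : 1 ≤ s) (hsn : s ≤ n) (hk : k ≤ n - s)
    (h : Filled piles n s k dp) :
    Filled piles n s (k + 1) (dpStepA piles n s dp k) := by
  obtain ⟨t, rfl⟩ : ∃ t, s = t + 1 := ⟨s - 1, by omega⟩
  obtain ⟨hlen, hrows, h⟩ := h
  have hjj : k + (t + 1) - 1 = k + t := by omega
  have hrow0 : (dp.getD (k + 1) []).length = n + 2 := hrows (k + 1) (by omega)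
  refine ⟨?_, ?_, ?_⟩
  · simp only [dpStepA, hjj, List.length_set]
    exact hlen
  · intro a ha
    simp only [dpStepA, hjj]
    rw [pv_getD_set]
    by_cases hc : k + 1 = a ∧ k + 1 < dp.length
    · rw [if_pos hc, List.length_set]
      exact hrow0
    · rw [if_neg hc]
      exact hrows a ha
  · intro a b
    simp only [dpStepA, hjj]
    rw [pv_getD_set]
    by_cases hc : k + 1 = a ∧ k + 1 < dp.length
    · rw [if_pos hc]
      rw [pv_getD_set]
      by_cases hc2 : k + t + 1 = b ∧ k + t + 1 < (dp.getD (k + 1) []).length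
      · -- the freshly written cell (k+1, k+t+1)
        rw [if_pos hc2]
        obtain ⟨ha, _⟩ := hc
        obtain ⟨hb, _⟩ := hc2
        subst ha; subst hb
        have hcond : 1 ≤ k + 1 ∧ k + 1 ≤ k + t + 1 ∧ k + t + 1 ≤ n ∧
            (k + t + 1 + 1 - (k + 1) < t + 1 ∨ (k + t + 1 + 1 - (k + 1) = t + 1 ∧ k + 1 ≤ k + 1)) := by
          omega
        rw [if_pos hcond]
        have e1 : ((k + 1 : Nat) : Int) - 1 = (k : Int) := by push_cast; ring
        have e2 : ((k + t + 1 : Nat) : Int) - 1 = (k : Int) + (t : Int) := by push_cast; ring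
        rw [e1, e2]
        exact step_cell piles n t k hsn hk dp h
      · rw [if_neg hc2, h (k + 1) b]
        obtain ⟨ha, _⟩ := hc
        subst ha
        by_cases hcc : 1 ≤ k + 1 ∧ k + 1 ≤ b ∧ b ≤ n ∧
            (b + 1 - (k + 1) < t + 1 ∨ (b + 1 - (k + 1) = t + 1 ∧ k + 1 ≤ k))
        · rw [if_pos hcc, if_pos (by omega)]
        · rw [if_neg hcc, if_neg (by rw [hrow0] at hc2; omega)]
    · rw [if_neg hc, h a b]
      rw [hlen] at hc
      by_cases hcc : 1 ≤ a ∧ a ≤ b ∧ b ≤ n ∧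
          (b + 1 - a < t + 1 ∨ (b + 1 - a = t + 1 ∧ a ≤ k))
      · rw [if_pos hcc, if_pos (by omega)]
      · rw [if_neg hcc, if_neg (by omega)]

theorem inner_filled (piles : List Int) (n s : Nat) (hs1 : 1 ≤ s) (hsn : s ≤ n) :
    ∀ (m : Nat) (dp : List (List Int)), m ≤ n - s + 1 → Filled piles n s 0 dp →
      Filled piles n s m ((List.range m).foldl (dpStepA piles n s) dp) := by
  intro m
  induction m with
  | zero => intro dp _ h; exact h
  | succ m ih =>
    intro dp hm h
    rw [List.range_succ, List.foldl_append, List.foldl_cons, List.foldl_nil]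
    exact step_filled piles n s m _ hs1 hsn (by omega) (ih dp (by omega) h)

-- weaken the invariant from "pass s complete" to "pass s+1 not started"
theorem filled_next (piles : List Int) (n s : Nat) (dp : List (List Int))
    (hsn : s ≤ n) (h : Filled piles n s (n - s + 1) dp) :
    Filled piles n (s + 1) 0 dp := by
  obtain ⟨h1, h2, h3⟩ := h
  refine ⟨h1, h2, ?_⟩
  intro a b
  rw [h3]
  by_cases hc : 1 ≤ a ∧ a ≤ b ∧ b ≤ n ∧ (b + 1 - a < s ∨ (b + 1 - a = s ∧ a ≤ n - s + 1))
  · rw [if_pos hc, if_pos (by omega)]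
  · rw [if_neg hc, if_neg (by omega)]

theorem outer_filled (piles : List Int) (n : Nat) :
    ∀ (cnt start : Nat) (dp : List (List Int)), 1 ≤ start → start + cnt = n + 1 →
      Filled piles n start 0 dp →
      Filled piles n (n + 1) 0
        ((List.range' start cnt).foldl
          (fun dp size => (List.range (n - size + 1)).foldl (dpStepA piles n size) dp) dp) := by
  intro cnt
  induction cnt with
  | zero =>
    intro start dp h1 h2 h
    have : start = n + 1 := by omega
    subst this
    simpa using h
  | succ cnt ih =>
    intro start dp h1 h2 h
    rw [List.range'_succ, List.foldl_cons]
    exact ih (start + 1) _ (by omega) (by omega)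
      (filled_next piles n start _ (by omega)
        (inner_filled piles n start h1 (by omega) (n - start + 1) dp (by omega) h))

-- ===== VERDICT (by name: the statement is the Claim_ definition above) =====
theorem stoneGameV0_spec : Claim_equal_stoneGameV0 := by
  intro piles _
  unfold Spec_stoneGameV0 stoneGameV0 stoneGameV0_alt
  simp only
  have hF := outer_filled piles piles.length piles.length 1
    (List.replicate (piles.length + 2) (List.replicate (piles.length + 2) 0))
    (by omega) (by omega) (filled_zero piles piles.length)
  rw [hF.2.2 1 piles.length]
  by_cases hn : 1 ≤ piles.length
  · rw [if_pos (by omega)]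
    have h1 : ((1 : Nat) : Int) - 1 = (0 : Int) := by omega
    have h2 : ((piles.length : Nat) : Int) - 1 = (piles.length : Int) - 1 := by omega
    rw [h1, h2]
  · have hn0 : piles.length = 0 := by omega
    rw [if_neg (by omega)]
    rw [hn0]
    simp [solveB]
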